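-- pv_equiv track=rewrite | github.com/heojungeun/codingtestPractice | level3/12987.py | solution
-- ===== SOURCE A (Python) =====
-- def solution(A, B):
--     answer = 0
--     ta = sorted(A)
--     tb = sorted(B)
--     for i in ta:
--         for j in tb:
--             if i < j:
--                 answer += 1
--                 tb.remove(j)
--                 break
--     return answer
-- ===== SOURCE B (Python) =====
-- def solution(A, B):
--     ta = sorted(A)
--     tb = sorted(B)
--     answer = 0
--     i = 0
--     for b in tb:
--         if i < len(ta) and ta[i] < b:
--             answer += 1
--             i += 1
--     return answer
-- ===== Notes on version B (the rewrite author's own statement) =====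
-- stated objective: faster
-- what changed: Replaced the nested scan-and-remove over sorted B (for each a, linear search for the first b > a, then list.remove) by a single linear sweep over sorted B advancing one index into sorted A.
import Mathlib
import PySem

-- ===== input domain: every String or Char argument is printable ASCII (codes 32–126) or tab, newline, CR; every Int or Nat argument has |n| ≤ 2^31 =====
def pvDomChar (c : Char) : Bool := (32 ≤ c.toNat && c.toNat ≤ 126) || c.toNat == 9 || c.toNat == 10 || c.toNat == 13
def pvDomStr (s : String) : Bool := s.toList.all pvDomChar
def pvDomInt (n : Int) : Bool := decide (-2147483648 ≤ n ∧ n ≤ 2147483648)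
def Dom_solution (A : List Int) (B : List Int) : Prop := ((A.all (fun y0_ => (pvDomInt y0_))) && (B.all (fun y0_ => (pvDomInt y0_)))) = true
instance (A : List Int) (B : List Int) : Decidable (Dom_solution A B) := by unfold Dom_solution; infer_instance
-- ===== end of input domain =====

-- B replaces A's quadratic find-and-remove loop by a single linear sweep over sorted B with one
-- index into sorted A (objective: faster, O((n+m) log(n+m)) after sorting vs O(n·m)).

-- ===== PORT A =====
-- inner 'for j in tb: if i < j: … break' — first element of tb greater than i
def findGt (i : Int) : List Int → Option Int
  | [] => none
  | j :: rest => if i < j then some j else findGt i rest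

-- outer loop over ta with the mutable list tb; tb.remove(j) is List.erase (first occurrence of an
-- equal value); it never raises here since j was just found in tb (PySem.List.remove?_eq_some_erase)
def loopA : List Int → List Int → Int
  | [], _ => 0
  | i :: rest, tb =>
    match findGt i tb with
    | some j => 1 + loopA rest (tb.erase j)
    | none => loopA rest tb

def solution (A : List Int) (B : List Int) : Int :=
  loopA (PySem.List.sorted A (fun x => x) false) (PySem.List.sorted B (fun x => x) false)

-- ===== PORT B =====
-- single pass over sorted B, advancing one index i into sorted A (state = (answer, i))
def solution_alt (A : List Int) (B : List Int) : Int :=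
  let ta := PySem.List.sorted A (fun x => x) false
  let tb := PySem.List.sorted B (fun x => x) false
  (tb.foldl
    (fun (st : Int × Int) b =>
      if st.2 < (ta.length : Int) ∧ PySem.List.pyGetD ta st.2 0 < b
      then (st.1 + 1, st.2 + 1) else st)
    (0, 0)).1

-- ===== PRECONDITION & SPEC =====
def Spec_solution (A : List Int) (B : List Int) (out : Int) : Prop := out = solution_alt A B
instance (A : List Int) (B : List Int) (out : Int) : Decidable (Spec_solution A B out) := by unfold Spec_solution; infer_instance

-- ===== CLAIM (what is proved, stated in full; the proofs are below) =====
def Claim_equal_solution : Prop := ∀ (A : List Int) (B : List Int), Dom_solution A B → Spec_solution A B (solution A B)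

-- ===== LEMMAS AND PROOFS =====

-- canonical two-pointer recursion both ports are reduced to
def twoPtr : List Int → List Int → Int
  | _, [] => 0
  | [], _ :: bs => twoPtr [] bs
  | a :: as, b :: bs => if a < b then 1 + twoPtr as bs else twoPtr (a :: as) bs

theorem twoPtr_nil_left (tb : List Int) : twoPtr [] tb = 0 := by
  induction tb with
  | nil => rfl
  | cons b bs ih => simpa [twoPtr] using ih

-- B's foldl, started at index i, equals twoPtr on the remaining suffix of ta
theorem foldl_eq_twoPtr (ta : List Int) :
    ∀ (tb : List Int) (ans : Int) (i : Nat),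
      (tb.foldl
        (fun (st : Int × Int) b =>
          if st.2 < (ta.length : Int) ∧ PySem.List.pyGetD ta st.2 0 < b
          then (st.1 + 1, st.2 + 1) else st)
        (ans, (i : Int))).1 = ans + twoPtr (ta.drop i) tb := by
  intro tb
  induction tb with
  | nil => intro ans i; simp [twoPtr]
  | cons b bs ih =>
    intro ans i
    by_cases hi : i < ta.length
    · have hget : PySem.List.pyGetD ta (i : Int) 0 = ta[i] :=
        PySem.List.pyGetD_ofNat ta i 0 hi
      have hdrop : ta.drop i = ta[i] :: ta.drop (i + 1) := List.drop_eq_getElem_cons hi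
      by_cases hlt : ta[i] < b
      · have hcond : ((i : Int) < (ta.length : Int) ∧ PySem.List.pyGetD ta (i : Int) 0 < b) := by
          constructor
          · exact_mod_cast hi
          · rw [hget]; exact hlt
        have : ((i : Int) + 1) = ((i + 1 : Nat) : Int) := by push_cast; ring
        simp only [List.foldl_cons, if_pos hcond, this, ih]
        rw [hdrop]
        simp [twoPtr, hlt]
        ring
      · have hcond : ¬ ((i : Int) < (ta.length : Int) ∧ PySem.List.pyGetD ta (i : Int) 0 < b) := by
          rw [hget]; intro h; exact hlt h.2
        simp only [List.foldl_cons, if_neg hcond, ih]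
        rw [hdrop]
        simp [twoPtr, hlt]
    · have hd : ta.drop i = [] := List.drop_eq_nil_of_le (by omega)
      have hcond : ¬ ((i : Int) < (ta.length : Int) ∧ PySem.List.pyGetD ta (i : Int) 0 < b) := by
        intro h; exact hi (by exact_mod_cast h.1)
      simp only [List.foldl_cons, if_neg hcond, ih, hd, twoPtr_nil_left]

-- findGt skips a prefix none of whose elements exceed i
theorem loopA_nil_right (ta : List Int) : loopA ta [] = 0 := by
  induction ta with
  | nil => rfl
  | cons a as ih => simpa [loopA, findGt] using ih

theorem findGt_append_of_le (i : Int) (p q : List Int) (hp : ∀ x ∈ p, ¬ i < x) :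
    findGt i (p ++ q) = findGt i q := by
  induction p with
  | nil => rfl
  | cons x xs ih =>
    have hx : ¬ i < x := hp x (by simp)
    simp only [List.cons_append, findGt, if_neg hx]
    exact ih (fun y hy => hp y (by simp [hy]))

-- loopA ignores tb-elements that no remaining ta-element can beat
theorem loopA_append_of_le (ta p q : List Int)
    (hp : ∀ x ∈ p, ∀ a ∈ ta, x ≤ a) :
    loopA ta (p ++ q) = loopA ta q := by
  induction ta generalizing q with
  | nil => rfl
  | cons a as ih =>
    have hpa : ∀ x ∈ p, ¬ a < x := fun x hx h =>
      absurd (hp x hx a (by simp)) (by omega)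
    have hfind : findGt a (p ++ q) = findGt a q := findGt_append_of_le a p q hpa
    have hp' : ∀ x ∈ p, ∀ b ∈ as, x ≤ b := fun x hx b hb => hp x hx b (by simp [hb])
    cases hq : findGt a q with
    | none => simp only [loopA, hfind, hq]; exact ih q hp'
    | some j =>
      have hij : a < j := by
        clear hfind
        induction q with
        | nil => simp [findGt] at hq
        | cons y ys ihq =>
          by_cases hy : a < y
          · simp [findGt, hy] at hq; omega
          · simp [findGt, hy] at hq; exact ihq hq
      have hjp : j ∉ p := fun hj => absurd (hp j hj a (by simp)) (by omega)
      have herase : (p ++ q).erase j = p ++ q.erase j := by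
        rw [List.erase_append_right _ hjp]
      simp only [loopA, hfind, hq, herase]
      rw [ih (q.erase j) hp']

theorem findGt_cons_of_lt {a b : Int} (bs : List Int) (h : a < b) :
    findGt a (b :: bs) = some b := by simp [findGt, h]

-- twoPtr also skips tb-elements not exceeding the current head of ta
theorem twoPtr_append_of_le (a : Int) (as p q : List Int) (hp : ∀ x ∈ p, ¬ a < x) :
    twoPtr (a :: as) (p ++ q) = twoPtr (a :: as) q := by
  induction p with
  | nil => rfl
  | cons x xs ih =>
    have hx : ¬ a < x := hp x (by simp)
    simp only [List.cons_append, twoPtr, if_neg hx]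
    exact ih (fun y hy => hp y (by simp [hy]))

-- main: on sorted inputs A's find-and-remove loop equals the two-pointer recursion
theorem loopA_eq_twoPtr : ∀ (ta tb : List Int),
    ta.Pairwise (· ≤ ·) → tb.Pairwise (· ≤ ·) → loopA ta tb = twoPtr ta tb := by
  intro ta
  induction ta with
  | nil => intro tb _ _; simp [loopA, twoPtr_nil_left]
  | cons a as ih =>
    intro tb hta htb
    have has : ∀ x ∈ as, a ≤ x := fun x hx => (List.pairwise_cons.mp hta).1 x hx
    have hasP : as.Pairwise (· ≤ ·) := (List.pairwise_cons.mp hta).2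
    -- split tb at the first element exceeding a
    set p := tb.takeWhile (fun b => decide (b ≤ a)) with hpdef
    set q := tb.dropWhile (fun b => decide (b ≤ a)) with hqdef
    have htbpq : tb = p ++ q := (List.takeWhile_append_dropWhile).symm
    have hpmem : ∀ x ∈ p, x ≤ a := by
      intro x hx
      have := List.mem_takeWhile_imp hx
      simpa using this
    have hpnlt : ∀ x ∈ p, ¬ a < x := fun x hx h => absurd (hpmem x hx) (by omega)
    have hpall : ∀ x ∈ p, ∀ b ∈ as, x ≤ b := fun x hx b hb =>
      le_trans (hpmem x hx) (has b hb)
    cases hq : q with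
    | nil =>
      -- no element of tb exceeds a: both sides are the count on the empty remainder
      rw [htbpq, hq, List.append_nil]
      have h1 : loopA (a :: as) p = loopA as p := by
        have : findGt a p = none := by
          have := findGt_append_of_le a p [] hpnlt
          simpa using this
        simp [loopA, this]
      have h2 : loopA as p = loopA as [] := by
        have := loopA_append_of_le as p [] hpall
        simpa using this
      have h3 : twoPtr (a :: as) p = twoPtr (a :: as) [] := by
        have := twoPtr_append_of_le a as p [] hpnlt
        simpa using this
      rw [h1, h2, h3, loopA_nil_right]
      rfl
    | cons b bs =>
      have hab : a < b := by
        have hhead : ¬ ((fun b => decide (b ≤ a)) b = true) := by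
          have := List.head_dropWhile_not (p := fun b => decide (b ≤ a)) (l := tb)
            (by rw [← hqdef, hq]; simp)
          simpa [← hqdef, hq] using this
        simpa using hhead
      have hqsub : q.Sublist tb := List.dropWhile_sublist _
      have hqP : (b :: bs).Pairwise (· ≤ ·) := by
        rw [← hq]; exact List.Pairwise.sublist hqsub htb
      have hbsP : bs.Pairwise (· ≤ ·) := (List.pairwise_cons.mp hqP).2
      have hfind : findGt a tb = some b := by
        rw [htbpq, hq, findGt_append_of_le a p _ hpnlt, findGt_cons_of_lt bs hab]
      have hbnp : b ∉ p := fun hb => absurd (hpmem b hb) (by omega)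
      have herase : tb.erase b = p ++ bs := by
        rw [htbpq, hq, List.erase_append_right _ hbnp]
        simp [List.erase_cons_head]
      have hL : loopA (a :: as) tb = 1 + loopA as bs := by
        simp only [loopA, hfind, herase]
        rw [loopA_append_of_le as p bs hpall]
      have hR : twoPtr (a :: as) tb = 1 + twoPtr as bs := by
        rw [htbpq, hq, twoPtr_append_of_le a as p _ hpnlt]
        simp [twoPtr, hab]
      rw [hL, hR, ih bs hasP hbsP]

-- ===== VERDICT (by name: the statement is the Claim_ definition above) =====
theorem solution_spec : Claim_equal_solution := by
  intro A B _
  unfold Spec_solution solution solution_alt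
  have hB := foldl_eq_twoPtr (PySem.List.sorted A (fun x => x) false)
    (PySem.List.sorted B (fun x => x) false) 0 0
  simp only [Nat.cast_zero, List.drop_zero, zero_add] at hB
  rw [hB]
  exact loopA_eq_twoPtr _ _
    (PySem.List.sorted_pairwise A (fun x => x) )
    (PySem.List.sorted_pairwise B (fun x => x) )
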